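-- pv_equiv track=rewrite | github.com/bobskefeurat/ListCompare | listcompare/interfaces/ui_app.py | _merge_supplier_lists
-- ===== SOURCE A (Python) =====
-- def _normalize_supplier_names(raw_names: list[str]) -> list[str]:
--     unique_by_folded: dict[str, str] = {}
--     for raw_name in raw_names:
--         supplier_name = str(raw_name).strip()
--         if supplier_name == "" or supplier_name.casefold() == "nan":
--             continue
--         folded = supplier_name.casefold()
--         if folded not in unique_by_folded:
--             unique_by_folded[folded] = supplier_name
--
--     return sorted(unique_by_folded.values(), key=lambda name: name.casefold())
--
-- def _merge_supplier_lists(existing: list[str], discovered: list[str]) -> tuple[list[str], list[str]]: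
--     by_folded: dict[str, str] = {}
--     for name in _normalize_supplier_names(existing):
--         by_folded[name.casefold()] = name
--
--     new_names: list[str] = []
--     for name in _normalize_supplier_names(discovered):
--         folded = name.casefold()
--         if folded not in by_folded:
--             by_folded[folded] = name
--             new_names.append(name)
--
--     merged = sorted(by_folded.values(), key=lambda value: value.casefold())
--     return merged, new_names
-- ===== SOURCE B (Python) =====
-- def _normalize_supplier_names(raw_names):
--     unique_by_folded = {}
--     for raw_name in raw_names:
--         supplier_name = str(raw_name).strip()
--         if supplier_name == "" or supplier_name.casefold() == "nan":
--             continue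
--         folded = supplier_name.casefold()
--         if folded not in unique_by_folded:
--             unique_by_folded[folded] = supplier_name
--     return sorted(unique_by_folded.values(), key=lambda name: name.casefold())
--
--
-- def _merge_supplier_lists(existing, discovered):
--     # One combined normalization gives the merged list directly (existing precedes
--     # discovered, so first-occurrence/existing-wins resolution is preserved);
--     # new names are the normalized discovered entries whose folded key is absent
--     # from the normalized existing set.
--     merged = _normalize_supplier_names(existing + discovered)
--     existing_folded = {name.casefold() for name in _normalize_supplier_names(existing)}
--     new_names = [name for name in _normalize_supplier_names(discovered)
--                  if name.casefold() not in existing_folded]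
--     return merged, new_names
-- ===== Notes on version B (the rewrite author's own statement) =====
-- stated objective: simpler
-- what changed: B replaces A's two-stage dict threading (normalize each list, re-insert existing into a by_folded dict, then conditionally grow it while collecting new names) with a single combined normalization of existing+discovered for the merged list plus a set-difference filter over the normalized discovered list for the new names.
import Mathlib
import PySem

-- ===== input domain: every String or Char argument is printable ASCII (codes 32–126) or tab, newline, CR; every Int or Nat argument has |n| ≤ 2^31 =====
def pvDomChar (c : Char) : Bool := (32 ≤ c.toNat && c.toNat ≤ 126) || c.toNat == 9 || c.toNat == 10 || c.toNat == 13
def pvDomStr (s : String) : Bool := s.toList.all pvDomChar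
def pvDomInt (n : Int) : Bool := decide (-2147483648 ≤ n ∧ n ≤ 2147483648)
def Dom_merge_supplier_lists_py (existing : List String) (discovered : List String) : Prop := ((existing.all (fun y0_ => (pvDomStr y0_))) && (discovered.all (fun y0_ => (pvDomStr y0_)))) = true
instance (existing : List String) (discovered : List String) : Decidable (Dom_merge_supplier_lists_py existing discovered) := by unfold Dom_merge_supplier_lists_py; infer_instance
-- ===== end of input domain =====

-- B builds the merged list by one combined normalization of existing++discovered and the
-- new-name list by a set-difference filter, instead of A's threaded by_folded dict; same cost,
-- simpler decomposition. casefold is ported as PySem.Str.lower (exact on the ASCII domain Dom_).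


-- ===== PORT A =====
-- shared helper: Python's _normalize_supplier_names (both A and B call this same module helper)
def pvNormStep (d : PySem.Dict String String) (raw_name : String) : PySem.Dict String String :=
  let supplier_name := PySem.Str.strip raw_name
  if supplier_name == "" || PySem.Str.lower supplier_name == "nan" then d
  else
    let folded := PySem.Str.lower supplier_name
    if d.contains folded then d else d.insert folded supplier_name

def normalize_supplier_names (raw_names : List String) : List String :=
  PySem.List.sorted ((raw_names.foldl pvNormStep PySem.Dict.empty).values)
    (fun name => PySem.Str.lower name)

def merge_supplier_lists_py (existing : List String) (discovered : List String) : List String × List String :=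
  let by_folded := (normalize_supplier_names existing).foldl
      (fun d name => d.insert (PySem.Str.lower name) name) PySem.Dict.empty
  let st := (normalize_supplier_names discovered).foldl
      (fun (st : PySem.Dict String String × List String) name =>
        let folded := PySem.Str.lower name
        if st.1.contains folded then st
        else (st.1.insert folded name, st.2 ++ [name])) (by_folded, [])
  (PySem.List.sorted st.1.values (fun value => PySem.Str.lower value), st.2)

-- ===== PORT B =====
def merge_supplier_lists_py_alt (existing : List String) (discovered : List String) : List String × List String :=
  let merged := normalize_supplier_names (existing ++ discovered)
  let existing_folded := PySem.Set.ofList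
      ((normalize_supplier_names existing).map (fun name => PySem.Str.lower name))
  let new_names := (normalize_supplier_names discovered).filter
      (fun name => !(PySem.Set.contains existing_folded (PySem.Str.lower name)))
  (merged, new_names)

-- ===== PRECONDITION & SPEC =====
def Spec_merge_supplier_lists_py (existing : List String) (discovered : List String) (out : List String × List String) : Prop := out = merge_supplier_lists_py_alt existing discovered
instance (existing : List String) (discovered : List String) (out : List String × List String) : Decidable (Spec_merge_supplier_lists_py existing discovered out) := by unfold Spec_merge_supplier_lists_py; infer_instance

-- ===== CLAIM (what is proved, stated in full; the proofs are below) =====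
def Claim_equal_merge_supplier_lists_py : Prop := ∀ (existing : List String) (discovered : List String), Dom_merge_supplier_lists_py existing discovered → Spec_merge_supplier_lists_py existing discovered (merge_supplier_lists_py existing discovered)

-- ===== LEMMAS AND PROOFS =====

-- the stripped, non-empty, non-"nan" names (what the normalize loop actually processes)
def pvClean (xs : List String) : List String :=
  (xs.map PySem.Str.strip).filter (fun s => !(s == "" || PySem.Str.lower s == "nan"))

-- conditional first-wins insert keyed by lower
def pvStepC (d : PySem.Dict String String) (s : String) : PySem.Dict String String :=
  if d.contains (PySem.Str.lower s) then d else d.insert (PySem.Str.lower s) s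

theorem pvClean_cons (x : String) (xs : List String) :
    pvClean (x :: xs)
      = if (PySem.Str.strip x == "" || PySem.Str.lower (PySem.Str.strip x) == "nan") = true
        then pvClean xs else PySem.Str.strip x :: pvClean xs := by
  by_cases h : (PySem.Str.strip x == "" || PySem.Str.lower (PySem.Str.strip x) == "nan") = true
  · simp only [pvClean, List.map_cons, List.filter_cons, h, Bool.not_true, if_pos]
    simp
  · simp only [pvClean, List.map_cons, List.filter_cons, Bool.not_eq_eq_eq_not, Bool.not_true,
      if_neg h]
    simp [Bool.eq_false_iff.mpr h]

theorem pvL0 (xs : List String) (d : PySem.Dict String String) :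
    xs.foldl pvNormStep d = (pvClean xs).foldl pvStepC d := by
  induction xs generalizing d with
  | nil => rfl
  | cons x xs ih =>
    rw [List.foldl_cons, pvClean_cons]
    by_cases h : (PySem.Str.strip x == "" || PySem.Str.lower (PySem.Str.strip x) == "nan") = true
    · rw [if_pos h, show pvNormStep d x = d from by simp [pvNormStep, h], ih]
    · rw [if_neg h, List.foldl_cons,
        show pvNormStep d x = pvStepC d (PySem.Str.strip x) from by
          simp only [pvNormStep, pvStepC]; rw [if_neg h], ih]

theorem pvG (l : List String) (d : PySem.Dict String String) (k : String) :
    ((l.foldl pvStepC d).get? k)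
      = (d.get? k).or (l.find? (fun s => PySem.Str.lower s == k)) := by
  induction l generalizing d with
  | nil => simp
  | cons s l ih =>
    rw [List.foldl_cons, List.find?_cons]
    by_cases hc : d.contains (PySem.Str.lower s) = true
    · rw [show pvStepC d s = d from by simp [pvStepC, hc], ih]
      by_cases hk : (PySem.Str.lower s == k) = true
      · have hks : k = PySem.Str.lower s := (eq_of_beq hk).symm
        obtain ⟨v, hv⟩ : ∃ v, d.get? k = some v := by
          subst hks
          rw [PySem.Dict.contains_eq_isSome_get?] at hc
          exact Option.isSome_iff_exists.mp hc
        simp [hk, hv]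
      · simp [hk]
    · rw [show pvStepC d s = d.insert (PySem.Str.lower s) s from by simp [pvStepC, hc], ih]
      have hdk : d.get? (PySem.Str.lower s) = none := by
        rw [PySem.Dict.contains_eq_isSome_get?] at hc
        simpa using hc
      by_cases hk : (PySem.Str.lower s == k) = true
      · have hks : k = PySem.Str.lower s := (eq_of_beq hk).symm
        subst hks
        simp [PySem.Dict.get?_insert_self, hdk]
      · have hne : k ≠ PySem.Str.lower s := fun h => hk (by simp [h])
        simp [hk, PySem.Dict.get?_insert_of_ne d s hne]

theorem pvK (l : List String) (d : PySem.Dict String String) :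
    (l.foldl pvStepC d).keys = PySem.Set.update d.keys (l.map (fun s => PySem.Str.lower s)) := by
  induction l generalizing d with
  | nil => simp [PySem.Set.update_nil]
  | cons s l ih =>
    rw [List.foldl_cons, List.map_cons, PySem.Set.update_cons]
    by_cases hc : d.contains (PySem.Str.lower s) = true
    · rw [show pvStepC d s = d from by simp [pvStepC, hc], ih,
        PySem.Set.add_of_mem ((PySem.Dict.contains_iff_mem_keys d _).mp hc)]
    · rw [show pvStepC d s = d.insert (PySem.Str.lower s) s from by simp [pvStepC, hc], ih,
        PySem.Dict.keys_insert_of_not_contains d s (by simpa using hc),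
        PySem.Set.add_of_not_mem (fun hm => hc ((PySem.Dict.contains_iff_mem_keys d _).mpr hm))]

theorem pvND (l : List String) (d : PySem.Dict String String) (h : d.keys.Nodup) :
    (l.foldl pvStepC d).keys.Nodup := by
  rw [pvK]; exact PySem.Set.nodup_update _ _ h

theorem pvINV (l : List String) (d : PySem.Dict String String)
    (h : ∀ p ∈ d.items, p.1 = PySem.Str.lower p.2) :
    ∀ p ∈ (l.foldl pvStepC d).items, p.1 = PySem.Str.lower p.2 := by
  induction l generalizing d with
  | nil => exact h
  | cons s l ih =>
    rw [List.foldl_cons]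
    by_cases hc : d.contains (PySem.Str.lower s) = true
    · rw [show pvStepC d s = d from by simp [pvStepC, hc]]
      exact ih d h
    · rw [show pvStepC d s = d.insert (PySem.Str.lower s) s from by simp [pvStepC, hc]]
      refine ih _ (fun p hp => ?_)
      rw [PySem.Dict.items_insert_of_not_contains d s (by simpa using hc)] at hp
      rcases List.mem_append.mp hp with hp | hp
      · exact h p hp
      · simp at hp; subst hp; rfl

theorem pvKEYVAL (d : PySem.Dict String String)
    (h : ∀ p ∈ d.items, p.1 = PySem.Str.lower p.2) :
    d.keys = d.values.map (fun v => PySem.Str.lower v) := by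
  show d.items.map (fun p => p.1) = (d.items.map (fun p => p.2)).map (fun v => PySem.Str.lower v)
  rw [List.map_map]
  exact List.map_congr_left (fun p hp => h p hp)

theorem pvFRESH (l : List String) (d : PySem.Dict String String)
    (h1 : (l.map (fun s => PySem.Str.lower s)).Nodup)
    (h2 : ∀ s ∈ l, d.contains (PySem.Str.lower s) = false) :
    l.foldl (fun d name => d.insert (PySem.Str.lower name) name) d = l.foldl pvStepC d := by
  induction l generalizing d with
  | nil => rfl
  | cons s l ih =>
    rw [List.map_cons, List.nodup_cons] at h1
    rw [List.foldl_cons, List.foldl_cons,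
      show pvStepC d s = d.insert (PySem.Str.lower s) s from by
        simp [pvStepC, h2 s (by simp)]]
    refine ih _ h1.2 (fun t ht => ?_)
    rw [PySem.Dict.contains_insert]
    have hne : (PySem.Str.lower t == PySem.Str.lower s) = false := by
      simp only [beq_eq_false_iff_ne, ne_eq]
      intro he
      exact h1.1 (he ▸ List.mem_map_of_mem ht)
    simp [hne, h2 t (List.mem_cons_of_mem _ ht)]

theorem pvPAIRFOLD (l : List String) (d : PySem.Dict String String) (acc : List String)
    (h : (l.map (fun s => PySem.Str.lower s)).Nodup) :
    l.foldl (fun (st : PySem.Dict String String × List String) name =>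
        if st.1.contains (PySem.Str.lower name) then st
        else (st.1.insert (PySem.Str.lower name) name, st.2 ++ [name])) (d, acc)
      = (l.foldl pvStepC d, acc ++ l.filter (fun n => !(d.contains (PySem.Str.lower n)))) := by
  induction l generalizing d acc with
  | nil => simp
  | cons s l ih =>
    rw [List.map_cons, List.nodup_cons] at h
    rw [List.foldl_cons, List.foldl_cons, List.filter_cons]
    by_cases hc : d.contains (PySem.Str.lower s) = true
    · rw [show pvStepC d s = d from by simp [pvStepC, hc],
        if_pos hc, if_neg (by simp [hc] : ¬((!d.contains (PySem.Str.lower s)) = true))]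
      exact ih d acc h.2
    · rw [show pvStepC d s = d.insert (PySem.Str.lower s) s from by simp [pvStepC, hc],
        if_neg hc, if_pos (by simp [Bool.eq_false_iff.mpr hc] :
          ((!d.contains (PySem.Str.lower s)) = true)),
        ih _ _ h.2]
      refine Prod.ext rfl ?_
      show acc ++ [s] ++ _ = acc ++ (s :: _)
      rw [List.append_assoc, List.singleton_append]
      congr 1
      congr 1
      refine List.filter_congr (fun t ht => ?_)
      rw [PySem.Dict.contains_insert]
      have hne : (PySem.Str.lower t == PySem.Str.lower s) = false := by
        simp only [beq_eq_false_iff_ne, ne_eq]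
        intro he
        exact h.1 (he ▸ List.mem_map_of_mem ht)
      simp [hne]

theorem pvVU (d : PySem.Dict String String) (hnd : d.keys.Nodup)
    (hinv : ∀ p ∈ d.items, p.1 = PySem.Str.lower p.2) (k : String) (v : String) :
    d.get? k = some v ↔ v ∈ d.values ∧ PySem.Str.lower v = k := by
  constructor
  · intro hg
    have hm : (k, v) ∈ d.items := PySem.Dict.mem_items_of_get?_eq_some d hg
    refine ⟨?_, ((hinv _ hm).symm : PySem.Str.lower v = k)⟩
    have hv' : v ∈ d.items.map (fun p => p.2) := List.mem_map_of_mem (f := fun p => p.2) hm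
    simpa [PySem.Dict.values] using hv'
  · rintro ⟨hv, hk⟩
    simp only [PySem.Dict.values, List.mem_map] at hv
    obtain ⟨p, hp, hp2⟩ := hv
    have h1 : p.1 = k := by rw [hinv p hp, hp2, hk]
    have hmem : (k, v) ∈ d.items := by rw [← h1, ← hp2]; simpa using hp
    exact PySem.Dict.get?_of_mem_items d hmem hnd

theorem pvFINDPERM (l : List String) (d : PySem.Dict String String) (hnd : d.keys.Nodup)
    (hinv : ∀ p ∈ d.items, p.1 = PySem.Str.lower p.2) (hperm : l.Perm d.values) (k : String) :
    l.find? (fun s => PySem.Str.lower s == k) = d.get? k := by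
  cases hf : l.find? (fun s => PySem.Str.lower s == k) with
  | some v =>
    have hp : PySem.Str.lower v = k := by simpa using List.find?_some hf
    have hm : v ∈ d.values := hperm.subset (List.mem_of_find?_eq_some hf)
    exact ((pvVU d hnd hinv k v).mpr ⟨hm, hp⟩).symm
  | none =>
    cases hg : d.get? k with
    | none => rfl
    | some v =>
      obtain ⟨hv, hk⟩ := (pvVU d hnd hinv k v).mp hg
      have := List.find?_eq_none.mp hf v (hperm.mem_iff.mpr hv)
      simp [hk] at this

theorem pvPLT (l : List String) (f : String → String)
    (h1 : l.Pairwise (fun a b => f a ≤ f b)) (h2 : (l.map f).Nodup) :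
    l.Pairwise (fun a b => f a < f b) := by
  have h2' : l.Pairwise (fun a b => f a ≠ f b) := (List.pairwise_map).mp h2
  exact (h1.and h2').imp (fun h => lt_of_le_of_ne h.1 h.2)

-- abbreviation lemmas specialised to one input list
theorem pvNormD (xs : List String) :
    xs.foldl pvNormStep PySem.Dict.empty = (pvClean xs).foldl pvStepC PySem.Dict.empty :=
  pvL0 xs _

theorem pvNdD (xs : List String) : ((pvClean xs).foldl pvStepC PySem.Dict.empty).keys.Nodup :=
  pvND _ _ (by simp)

theorem pvInvD (xs : List String) :
    ∀ p ∈ ((pvClean xs).foldl pvStepC PySem.Dict.empty).items, p.1 = PySem.Str.lower p.2 :=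
  pvINV _ _ (by intro p hp; simp [PySem.Dict.empty] at hp)

theorem pvGetD (xs : List String) (k : String) :
    ((pvClean xs).foldl pvStepC PySem.Dict.empty).get? k
      = (pvClean xs).find? (fun s => PySem.Str.lower s == k) := by
  rw [pvG]; simp

theorem pvKeysD (xs : List String) :
    ((pvClean xs).foldl pvStepC PySem.Dict.empty).keys
      = PySem.Set.ofList ((pvClean xs).map (fun s => PySem.Str.lower s)) := by
  rw [pvK]
  exact PySem.Set.update_empty _

theorem pvNormPerm (xs : List String) :
    (normalize_supplier_names xs).Perm ((pvClean xs).foldl pvStepC PySem.Dict.empty).values := by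
  rw [normalize_supplier_names, pvNormD]
  exact PySem.List.sorted_perm _ _ _

theorem pvNormKeyNodup (xs : List String) :
    ((normalize_supplier_names xs).map (fun s => PySem.Str.lower s)).Nodup := by
  have hp := (pvNormPerm xs).map (fun s => PySem.Str.lower s)
  rw [hp.nodup_iff, ← pvKEYVAL _ (pvInvD xs)]
  exact pvNdD xs

theorem pvNormFind (xs : List String) (k : String) :
    (normalize_supplier_names xs).find? (fun s => PySem.Str.lower s == k)
      = ((pvClean xs).foldl pvStepC PySem.Dict.empty).get? k :=
  pvFINDPERM _ _ (pvNdD xs) (pvInvD xs) (pvNormPerm xs) k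

theorem pvNormMemKey (xs : List String) (k : String) :
    k ∈ (normalize_supplier_names xs).map (fun s => PySem.Str.lower s)
      ↔ k ∈ (pvClean xs).map (fun s => PySem.Str.lower s) := by
  have hp := (pvNormPerm xs).map (fun s => PySem.Str.lower s)
  rw [hp.mem_iff, ← pvKEYVAL _ (pvInvD xs), pvKeysD, PySem.Set.mem_ofList]

-- ===== VERDICT (by name: the statement is the Claim_ definition above) =====
theorem merge_supplier_lists_py_spec : Claim_equal_merge_supplier_lists_py := by
  intro existing discovered _
  unfold Spec_merge_supplier_lists_py
  simp only [merge_supplier_lists_py, merge_supplier_lists_py_alt]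
  have hndL1 := pvNormKeyNodup existing
  have hndL2 := pvNormKeyNodup discovered
  -- A's first loop inserts only fresh keys; its second loop is the conditional fold plus a filter
  rw [pvFRESH _ _ hndL1 (fun s _ => by simp), pvPAIRFOLD _ _ _ hndL2]
  set L1 := normalize_supplier_names existing with hL1def
  set L2 := normalize_supplier_names discovered with hL2def
  set d1 := List.foldl pvStepC PySem.Dict.empty L1 with hd1def
  set dA := List.foldl pvStepC d1 L2 with hdAdef
  set dE := List.foldl pvStepC PySem.Dict.empty (pvClean existing) with hdEdef
  have hnd1 : d1.keys.Nodup := pvND _ _ (by simp)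
  have hndA : dA.keys.Nodup := pvND _ _ hnd1
  have hget1 : ∀ k, d1.get? k = dE.get? k := fun k => by
    rw [hd1def, pvG]
    simp only [PySem.Dict.get?_empty, Option.none_or]
    exact pvNormFind existing k
  -- B's combined dict splits as: existing's dict, then discovered's cleaned names
  have hcleanapp : pvClean (existing ++ discovered) = pvClean existing ++ pvClean discovered := by
    simp [pvClean]
  have hBsplit : List.foldl pvStepC PySem.Dict.empty (pvClean (existing ++ discovered))
      = List.foldl pvStepC dE (pvClean discovered) := by
    rw [hcleanapp, List.foldl_append]
  set dB := List.foldl pvStepC dE (pvClean discovered) with hdBdef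
  have hnormB : normalize_supplier_names (existing ++ discovered)
      = PySem.List.sorted dB.values (fun name => PySem.Str.lower name) := by
    rw [normalize_supplier_names, pvNormD, hBsplit]
  have hndB : dB.keys.Nodup := pvND _ _ (pvNdD existing)
  have hinvB := pvINV (pvClean discovered) dE (pvInvD existing)
  -- the two dicts agree on every lookup
  have hgetAB : ∀ k, dA.get? k = dB.get? k := fun k => by
    rw [hdAdef, pvG, hget1 k, hdBdef, pvG, pvNormFind discovered k, pvGetD discovered k,
      pvG (pvClean discovered) dE k, hdEdef, pvGetD existing k]
    simp only [PySem.Dict.get?_empty, Option.none_or]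
  -- and have the same key set
  have hkeys1 : d1.keys = PySem.Set.ofList (L1.map (fun s => PySem.Str.lower s)) := by
    rw [hd1def, pvK]
    exact PySem.Set.update_empty _
  have hkeysA : dA.keys = PySem.Set.update (PySem.Set.ofList (L1.map (fun s => PySem.Str.lower s)))
      (L2.map (fun s => PySem.Str.lower s)) := by
    rw [hdAdef, pvK, hkeys1]
  have hkeysB : dB.keys
      = PySem.Set.update dE.keys ((pvClean discovered).map (fun s => PySem.Str.lower s)) := by
    rw [hdBdef, pvK]
  have hkeysperm : dA.keys.Perm dB.keys := by
    refine (List.perm_ext_iff_of_nodup hndA hndB).mpr (fun k => ?_)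
    rw [hkeysA, hkeysB]
    simp only [PySem.Set.mem_update, PySem.Set.mem_ofList]
    have h3 : k ∈ dE.keys ↔ k ∈ (pvClean existing).map (fun s => PySem.Str.lower s) := by
      rw [hdEdef, pvKeysD, PySem.Set.mem_ofList]
    rw [pvNormMemKey existing k, pvNormMemKey discovered k, h3]
  -- hence the same value multiset
  have hvals : dA.values.Perm dB.values := by
    rw [PySem.Dict.values_eq_map_keys dA hndA "", PySem.Dict.values_eq_map_keys dB hndB "",
      show (fun k => dA.getD k "") = (fun k => dB.getD k "") from funext fun k => by
        rw [PySem.Dict.getD_eq_get?_getD, PySem.Dict.getD_eq_get?_getD, hgetAB k]]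
    exact hkeysperm.map _
  -- merged lists: sorting either value list by its (duplicate-free) folded key gives the same list
  have hmerged : PySem.List.sorted dA.values (fun value => PySem.Str.lower value)
      = normalize_supplier_names (existing ++ discovered) := by
    rw [hnormB]
    apply PySem.List.sorted_eq_of_perm_of_pairwise_lt
    · exact (PySem.List.sorted_perm dB.values _ _).trans hvals.symm
    · apply pvPLT
      · exact PySem.List.sorted_pairwise dB.values _
      · have hp := (PySem.List.sorted_perm dB.values
            (fun name => PySem.Str.lower name) false).map (fun s => PySem.Str.lower s)
        rw [hp.nodup_iff, ← pvKEYVAL dB hinvB]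
        exact hndB
  -- new names: membership in A's first dict is membership in B's folded set
  have hcont1 : ∀ x, d1.contains x
      = (PySem.Set.ofList (L1.map (fun value => PySem.Str.lower value))).contains x := fun x => by
    rw [PySem.Dict.contains_eq_decide_mem_keys, hkeys1, PySem.Set.contains_eq_listContains,
      List.contains_eq_mem]
  have hnew : ([] : List String) ++ L2.filter (fun n => !(d1.contains (PySem.Str.lower n)))
      = L2.filter (fun name =>
          !((PySem.Set.ofList (L1.map (fun value => PySem.Str.lower value))).contains
            (PySem.Str.lower name))) := by
    rw [List.nil_append]
    exact List.filter_congr (fun t _ => by rw [hcont1])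
  exact Prod.ext hmerged hnew
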